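-- pv_equiv track=rewrite | github.com/Yawn-Sean/Daily_CF_Problems | daily_problems/2025/12/1225/personal_submission/cf106251g_liryc.py | solve
-- ===== SOURCE A (Python) =====
-- def solve(n: int, b: int, a: list[int]) -> list[list[int]]:
--     ans = []
--     if sum(a) % (b - 1) == 0:
--         li = []
--         r = 0
--         for x in a:
--             r = r * b + x
--             li.append(r // (b - 1))
--             r %= b - 1
--         ans.append([n + 2])
--         ans.append([1, 0] + li)
--         ans.append([1] + li + [0])
--     return ans
-- ===== SOURCE B (Python) =====
-- def solve(n: int, b: int, a: list[int]) -> list[list[int]]: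
--     # Since b == 1 (mod b-1), the running remainder after i digits is just
--     # (a[0]+...+a[i-1]) % (b-1); each quotient digit is then recovered by the
--     # EXACT division (r_prev*b + x - r_next) // (b-1): no long-division recurrence.
--     m = b - 1
--     pre = [0]
--     s = 0
--     for x in a:
--         s += x
--         pre.append(s)
--     if s % m != 0:
--         return []
--     rs = [p % m for p in pre]
--     li = [(r0 * b + x - r1) // m for r0, r1, x in zip(rs, rs[1:], a)]
--     return [[n + 2], [1, 0] + li, [1] + li + [0]]
-- ===== Notes on version B (the rewrite author's own statement) =====
-- stated objective: alternative
-- what changed: B abandons A's long-division recurrence (carrying the running remainder r through r = (r*b+x) % (b-1) while emitting quotients inline): using b ≡ 1 (mod b-1) it computes each remainder directly as the prefix digit-sum mod (b-1), then recovers every quotient digit by the exact division (r_prev*b + x - r_next)//(b-1) from consecutive table entries.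
import Mathlib
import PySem

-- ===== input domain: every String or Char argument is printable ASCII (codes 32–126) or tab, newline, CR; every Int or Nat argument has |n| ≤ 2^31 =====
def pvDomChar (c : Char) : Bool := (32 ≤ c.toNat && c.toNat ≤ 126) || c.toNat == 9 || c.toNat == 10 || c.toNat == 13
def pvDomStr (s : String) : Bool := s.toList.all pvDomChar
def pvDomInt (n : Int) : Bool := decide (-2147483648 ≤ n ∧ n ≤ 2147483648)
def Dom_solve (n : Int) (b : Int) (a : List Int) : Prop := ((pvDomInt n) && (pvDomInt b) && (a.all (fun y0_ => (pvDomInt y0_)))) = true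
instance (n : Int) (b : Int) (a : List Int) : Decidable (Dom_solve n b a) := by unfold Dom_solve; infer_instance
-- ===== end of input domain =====

-- B replaces A's long-division recurrence by the digit-sum identity: remainders are prefix sums mod (b-1), quotient digits come from exact division of consecutive table entries (objective: alternative algorithm, same cost).

-- ===== PORT A =====
-- A: one fused loop carrying (li, r); append (r*b+x) // (b-1) then set r to the new remainder.
def solve (n : Int) (b : Int) (a : List Int) : List (List Int) :=
  if PySem.Int.mod (a.foldl (· + ·) 0) (b - 1) = 0 then
    let s := a.foldl (fun (s : List Int × Int) x =>
      let r := s.2 * b + x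
      (s.1 ++ [PySem.Int.floordiv r (b - 1)], PySem.Int.mod r (b - 1))) ([], 0)
    [[n + 2], [1, 0] ++ s.1, [1] ++ s.1 ++ [0]]
  else []

-- ===== PORT B =====
-- B: build prefix sums pre (with total s); guard; remainders rs = pre % m; quotient digits by exact division from consecutive rs entries zipped with a.
def solve_alt (n : Int) (b : Int) (a : List Int) : List (List Int) :=
  let m := b - 1
  let ps := a.foldl (fun (p : List Int × Int) x => (p.1 ++ [p.2 + x], p.2 + x)) ([0], 0)
  if PySem.Int.mod ps.2 m ≠ 0 then []
  else
    let rs := ps.1.map (fun p => PySem.Int.mod p m)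
    let li := ((rs.zip (rs.drop 1)).zip a).map
      (fun t => PySem.Int.floordiv (t.1.1 * b + t.2 - t.1.2) m)
    [[n + 2], [1, 0] ++ li, [1] ++ li ++ [0]]

-- ===== PRECONDITION & SPEC =====
-- Pre_ excludes b = 1, where Python's '% (b - 1)' raises ZeroDivisionError in both programs.
def Pre_solve (n : Int) (b : Int) (a : List Int) : Prop := b ≠ 1
instance (n : Int) (b : Int) (a : List Int) : Decidable (Pre_solve n b a) := by unfold Pre_solve; infer_instance
def pvWitness_solve : Int × Int × List Int := (3, 10, [1, 8])
def Spec_solve (n : Int) (b : Int) (a : List Int) (out : List (List Int)) : Prop := out = solve_alt n b a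
instance (n : Int) (b : Int) (a : List Int) (out : List (List Int)) : Decidable (Spec_solve n b a out) := by unfold Spec_solve; infer_instance

-- ===== CLAIM (what is proved, stated in full; the proofs are below) =====
def Claim_equal_solve : Prop := ∀ (n : Int) (b : Int) (a : List Int), Dom_solve n b a → Pre_solve n b a → Spec_solve n b a (solve n b a)

-- ===== LEMMAS AND PROOFS =====

-- reference: the chain of quotient digits produced by A from starting remainder r
def liF (b : Int) : Int → List Int → List Int
  | _, [] => []
  | r, x :: xs => PySem.Int.floordiv (r * b + x) (b - 1) :: liF b (PySem.Int.mod (r * b + x) (b - 1)) xs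

-- reference: the list of prefix sums starting from s (s included)
def pref (s : Int) : List Int → List Int
  | [] => [s]
  | x :: xs => s :: pref (s + x) xs

theorem foldA_eq (b : Int) (xs : List Int) : ∀ (acc : List Int) (r : Int),
    (xs.foldl (fun (s : List Int × Int) x =>
      let rr := s.2 * b + x
      (s.1 ++ [PySem.Int.floordiv rr (b - 1)], PySem.Int.mod rr (b - 1))) (acc, r)).1
      = acc ++ liF b r xs := by
  induction xs with
  | nil => intro acc r; simp [liF]
  | cons x xs ih =>
    intro acc r
    simp only [List.foldl_cons, liF]
    rw [ih]
    simp

theorem foldB_eq (xs : List Int) : ∀ (acc : List Int) (s : Int),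
    xs.foldl (fun (p : List Int × Int) x => (p.1 ++ [p.2 + x], p.2 + x)) (acc ++ [s], s)
      = (acc ++ pref s xs, s + xs.sum) := by
  induction xs with
  | nil => intro acc s; simp [pref]
  | cons x xs ih =>
    intro acc s
    simp only [List.foldl_cons, pref]
    rw [show acc ++ [s] ++ [s + x] = (acc ++ [s]) ++ [s + x] by simp, ih]
    simp [add_assoc]

theorem foldl_add_eq_sum (xs : List Int) : ∀ (s : Int), xs.foldl (· + ·) s = s + xs.sum := by
  induction xs with
  | nil => intro s; simp
  | cons x xs ih => intro s; simp only [List.foldl_cons, List.sum_cons]; rw [ih]; ring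

theorem fmod_step (b s x : Int) :
    Int.fmod (Int.fmod s (b - 1) * b + x) (b - 1) = Int.fmod (s + x) (b - 1) := by
  have h1 : Int.fmod s (b - 1) * b + x
      = (Int.fmod s (b - 1) + x) + Int.fmod s (b - 1) * (b - 1) := by ring
  have hs := Int.fmod_add_mul_fdiv s (b - 1)
  have h2 : s + x = (Int.fmod s (b - 1) + x) + Int.fdiv s (b - 1) * (b - 1) := by linarith
  rw [h1, h2, Int.add_mul_fmod_self_right, Int.add_mul_fmod_self_right]

theorem fdiv_exact (b s x : Int) (hm : b - 1 ≠ 0) :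
    Int.fdiv (Int.fmod s (b - 1) * b + x - Int.fmod (s + x) (b - 1)) (b - 1)
      = Int.fdiv (Int.fmod s (b - 1) * b + x) (b - 1) := by
  rw [← fmod_step b s x]
  have ht := Int.fmod_add_mul_fdiv (Int.fmod s (b - 1) * b + x) (b - 1)
  have h : Int.fmod s (b - 1) * b + x - Int.fmod (Int.fmod s (b - 1) * b + x) (b - 1)
      = (b - 1) * Int.fdiv (Int.fmod s (b - 1) * b + x) (b - 1) := by linarith
  rw [h, Int.mul_fdiv_cancel_left _ hm]

theorem main_eq (b : Int) (hm : b - 1 ≠ 0) (xs : List Int) : ∀ (s : Int),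
    ((((pref s xs).map (fun p => PySem.Int.mod p (b - 1))).zip
       (((pref s xs).map (fun p => PySem.Int.mod p (b - 1))).drop 1)).zip xs).map
      (fun t => PySem.Int.floordiv (t.1.1 * b + t.2 - t.1.2) (b - 1))
      = liF b (PySem.Int.mod s (b - 1)) xs := by
  induction xs with
  | nil => intro s; simp [pref, liF]
  | cons x xs ih =>
    intro s
    -- the head of pref t xs is always t
    have hhead : ∀ t, pref t xs = t :: (pref t xs).tail := by
      intro t; cases xs <;> simp [pref]
    rw [show pref s (x :: xs) = s :: pref (s + x) xs from rfl]
    rw [hhead (s + x)]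
    simp only [List.map_cons, List.drop_succ_cons, List.drop_zero, List.zip_cons_cons,
      List.map_cons, liF]
    rw [show PySem.Int.floordiv
        (PySem.Int.mod s (b - 1) * b + x - PySem.Int.mod (s + x) (b - 1)) (b - 1)
        = PySem.Int.floordiv (PySem.Int.mod s (b - 1) * b + x) (b - 1) from by
      simp only [PySem.Int.floordiv, PySem.Int.mod]; exact fdiv_exact b s x hm]
    refine congrArg _ ?_
    have hr : PySem.Int.mod (PySem.Int.mod s (b - 1) * b + x) (b - 1)
        = PySem.Int.mod (s + x) (b - 1) := by
      simp only [PySem.Int.mod]; exact fmod_step b s x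
    rw [hr]
    have := ih (s + x)
    rw [hhead (s + x)] at this
    simp only [List.map_cons, List.drop_succ_cons, List.drop_zero] at this
    exact this

-- ===== VERDICT (by name: the statement is the Claim_ definition above) =====
theorem solve_spec : Claim_equal_solve := by
  intro n b a _ hb
  have hm : b - 1 ≠ 0 := fun h => hb (by omega)
  unfold Spec_solve solve solve_alt
  dsimp only
  have hps := foldB_eq a [] 0
  simp only [List.nil_append] at hps
  rw [hps]
  dsimp only
  have hsum : a.foldl (· + ·) 0 = (0 : Int) + a.sum := foldl_add_eq_sum a 0
  by_cases h : PySem.Int.mod (a.foldl (· + ·) 0) (b - 1) = 0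
  · have h2 : PySem.Int.mod ((0 : Int) + a.sum) (b - 1) = 0 := hsum ▸ h
    rw [if_pos h, if_neg (by simpa using h2)]
    rw [foldA_eq, main_eq b hm a 0]
    simp [PySem.Int.mod, Int.zero_fmod]
  · have h2 : ¬ PySem.Int.mod ((0 : Int) + a.sum) (b - 1) = 0 := hsum ▸ h
    rw [if_neg h, if_pos (by simpa using h2)]
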